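-- pv_equiv track=rewrite | github.com/yycy134679/video2prompt | src/video2prompt/parser_client.py | _pick_preferred_url_from_list
-- ===== SOURCE A (Python) =====
-- from typing import Any
--
-- def _pick_preferred_url_from_list(url_list: list[Any]) -> str | None:
--     urls = [str(item) for item in url_list if isinstance(item, str) and item.strip()]
--     if not urls:
--         return None
--
--     for url in urls:
--         lowered = url.lower()
--         if "v95-" in lowered or "v95." in lowered:
--             return url
--
--     for url in urls:
--         lowered = url.lower()
--         if "v26-" in lowered or "v26." in lowered:
--             continue
--         return url
--
--     return urls[0]
-- ===== SOURCE B (Python) =====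
-- def _pick_preferred_url_from_list(url_list):
--     urls = [str(item) for item in url_list if isinstance(item, str) and item.strip()]
--     if not urls:
--         return None
--     candidate = None
--     for url in urls:
--         lowered = url.lower()
--         if "v95-" in lowered or "v95." in lowered:
--             return url
--         if candidate is None and "v26-" not in lowered and "v26." not in lowered:
--             candidate = url
--     return candidate if candidate is not None else urls[0]
-- ===== Notes on version B (the rewrite author's own statement) =====
-- stated objective: alternative
-- what changed: Replaces A's two sequential scans (find v95, then find first non-v26) with a single pass that early-returns on v95 and records the first non-v26 candidate in an accumulator.
import Mathlib
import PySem

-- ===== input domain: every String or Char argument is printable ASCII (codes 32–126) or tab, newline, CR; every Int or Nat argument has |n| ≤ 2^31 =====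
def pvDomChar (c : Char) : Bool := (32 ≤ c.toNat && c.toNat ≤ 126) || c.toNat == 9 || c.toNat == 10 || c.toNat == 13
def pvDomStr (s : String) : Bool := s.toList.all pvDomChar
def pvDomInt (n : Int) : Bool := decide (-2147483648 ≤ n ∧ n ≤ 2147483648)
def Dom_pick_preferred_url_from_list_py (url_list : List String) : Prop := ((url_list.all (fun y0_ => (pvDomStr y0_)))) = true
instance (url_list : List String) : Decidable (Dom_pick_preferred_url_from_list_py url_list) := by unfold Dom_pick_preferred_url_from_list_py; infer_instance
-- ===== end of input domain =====

-- B replaces A's two sequential scans with one pass (early return on v95, accumulator for the first non-v26 URL); objective: alternative decomposition.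

-- ===== PORT A =====
-- "v95-" in url.lower() or "v95." in url.lower()
def pvHasV95 (url : String) : Bool :=
  PySem.Str.isIn "v95-" (PySem.Str.lower url) || PySem.Str.isIn "v95." (PySem.Str.lower url)

-- "v26-" in url.lower() or "v26." in url.lower()
def pvHasV26 (url : String) : Bool :=
  PySem.Str.isIn "v26-" (PySem.Str.lower url) || PySem.Str.isIn "v26." (PySem.Str.lower url)

-- A's first loop: return the first url containing v95
def pvFind95 : List String → Option String
  | [] => none
  | u :: rest => if pvHasV95 u then some u else pvFind95 rest

-- A's second loop: skip v26 urls, return the first other one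
def pvFindNon26 : List String → Option String
  | [] => none
  | u :: rest => if pvHasV26 u then pvFindNon26 rest else some u

def pick_preferred_url_from_list_py (url_list : List String) : Option String :=
  let urls := url_list.filter (fun s => PySem.Str.strip s ≠ "")
  match urls with
  | [] => none
  | first :: _ =>
    match pvFind95 urls with
    | some u => some u
    | none =>
      match pvFindNon26 urls with
      | some u => some u
      | none => some first

-- ===== PORT B =====
-- B's single loop: early return on v95; cand records the first non-v26 url
def pvScanB : List String → Option String → String → Option String
  | [], cand, first =>
    match cand with
    | some c => some c
    | none => some first
  | u :: rest, cand, first =>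
    if pvHasV95 u then some u
    else pvScanB rest (if cand.isNone && !pvHasV26 u then some u else cand) first

def pick_preferred_url_from_list_py_alt (url_list : List String) : Option String :=
  let urls := url_list.filter (fun s => PySem.Str.strip s ≠ "")
  match urls with
  | [] => none
  | first :: _ => pvScanB urls none first

-- ===== PRECONDITION & SPEC =====
def Spec_pick_preferred_url_from_list_py (url_list : List String) (out : Option String) : Prop := out = pick_preferred_url_from_list_py_alt url_list
instance (url_list : List String) (out : Option String) : Decidable (Spec_pick_preferred_url_from_list_py url_list out) := by unfold Spec_pick_preferred_url_from_list_py; infer_instance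

-- ===== CLAIM (what is proved, stated in full; the proofs are below) =====
def Claim_equal_pick_preferred_url_from_list_py : Prop := ∀ (url_list : List String), Dom_pick_preferred_url_from_list_py url_list → Spec_pick_preferred_url_from_list_py url_list (pick_preferred_url_from_list_py url_list)

-- ===== LEMMAS AND PROOFS =====

-- B's fused scan equals A's two-scan composition, generalised over the accumulator.
theorem pvScanB_eq (urls : List String) (cand : Option String) (first : String) :
    pvScanB urls cand first =
      match pvFind95 urls with
      | some u => some u
      | none =>
        match cand with
        | some c => some c
        | none =>
          match pvFindNon26 urls with
          | some u => some u
          | none => some first := by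
  induction urls generalizing cand with
  | nil => cases cand <;> simp [pvScanB, pvFind95, pvFindNon26]
  | cons u rest ih =>
    simp only [pvScanB, pvFind95, pvFindNon26]
    by_cases h95 : pvHasV95 u
    · simp [h95]
    · simp only [h95, if_false, Bool.false_eq_true, ih]
      cases cand with
      | some c => simp
      | none =>
        by_cases h26 : pvHasV26 u <;> simp [h26]

-- ===== VERDICT (by name: the statement is the Claim_ definition above) =====
theorem pick_preferred_url_from_list_py_spec : Claim_equal_pick_preferred_url_from_list_py := by
  intro url_list _
  unfold Spec_pick_preferred_url_from_list_py
  unfold pick_preferred_url_from_list_py pick_preferred_url_from_list_py_alt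
  cases h : url_list.filter (fun s => PySem.Str.strip s ≠ "") with
  | nil => simp
  | cons first rest => simp [pvScanB_eq]
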